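-- pv_equiv track=rewrite | github.com/Shubham37204/DSA | PATTERNS/Triangle2.py | incrementingTriangle
-- ===== SOURCE A (Python) =====
-- from typing import List
--
-- def incrementingTriangle(n: int) -> List[str]:
--     """
--     Generate incrementing triangle pattern with numbers.
--
--     Args:
--         n: Number of rows
--
--     Returns:
--         List of strings representing each row
--
--     Time Complexity: O(n^2)
--     Space Complexity: O(n^2)
--     """
--     result = []
--
--     for i in range(1, n + 1):
--         row = ""
--         for j in range(1, i + 1):
--             row += str(j)
--         result.append(row)
--
--     return result
-- ===== SOURCE B (Python) =====
-- from typing import List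
--
-- def incrementingTriangle(n: int) -> List[str]:
--     # Build the final row once; every earlier row is a prefix slice of it,
--     # cut at the cumulative length of str(1)..str(i).
--     full = ''.join(str(j) for j in range(1, n + 1))
--     result = []
--     offset = 0
--     for i in range(1, n + 1):
--         offset += len(str(i))
--         result.append(full[:offset])
--     return result
-- ===== Notes on version B (the rewrite author's own statement) =====
-- stated objective: faster
-- what changed: Instead of rebuilding each row with a nested loop of string appends, B precomputes the full last row once and emits every row as a prefix slice at a cumulative digit-length offset.
import Mathlib
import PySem

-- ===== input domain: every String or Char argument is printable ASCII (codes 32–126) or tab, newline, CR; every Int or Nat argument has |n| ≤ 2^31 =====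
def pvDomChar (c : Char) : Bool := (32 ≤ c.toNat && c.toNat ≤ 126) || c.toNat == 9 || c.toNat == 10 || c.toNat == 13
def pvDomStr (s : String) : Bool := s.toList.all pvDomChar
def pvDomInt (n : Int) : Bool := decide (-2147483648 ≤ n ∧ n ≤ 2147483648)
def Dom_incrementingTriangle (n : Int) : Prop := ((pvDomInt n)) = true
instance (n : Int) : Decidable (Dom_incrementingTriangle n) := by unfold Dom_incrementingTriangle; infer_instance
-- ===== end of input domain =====

-- B precomputes the full last row once and emits every row as a prefix slice of it
-- at a cumulative digit-length offset, instead of rebuilding each row with a nested loop.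

-- ===== PORT A =====
def incrementingTriangle (n : Int) : List String :=
  (PySem.List.pyRange 1 (n + 1) 1).foldl
    (fun result i =>
      result ++ [(PySem.List.pyRange 1 (i + 1) 1).foldl
        (fun row j => row ++ PySem.Int.toStr j) ""])
    []

-- ===== PORT B =====
def incrementingTriangle_alt (n : Int) : List String :=
  let full := PySem.Str.join "" ((PySem.List.pyRange 1 (n + 1) 1).map PySem.Int.toStr)
  ((PySem.List.pyRange 1 (n + 1) 1).foldl
    (fun (st : Int × List String) i =>
      let offset := st.1 + PySem.Str.len (PySem.Int.toStr i)
      (offset, st.2 ++ [PySem.Str.slice full none (some offset)]))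
    (0, [])).2

-- ===== PRECONDITION & SPEC =====
def Spec_incrementingTriangle (n : Int) (out : List String) : Prop := out = incrementingTriangle_alt n
instance (n : Int) (out : List String) : Decidable (Spec_incrementingTriangle n out) := by unfold Spec_incrementingTriangle; infer_instance

-- ===== CLAIM (what is proved, stated in full; the proofs are below) =====
def Claim_equal_incrementingTriangle : Prop := ∀ (n : Int), Dom_incrementingTriangle n → Spec_incrementingTriangle n (incrementingTriangle n)

-- ===== LEMMAS AND PROOFS =====

-- A's inner loop: the row string for index i
def pvRowA (i : Int) : String :=
  (PySem.List.pyRange 1 (i + 1) 1).foldl (fun row j => row ++ PySem.Int.toStr j) ""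

-- B's precomputed full string
def pvFull (n : Int) : String :=
  PySem.Str.join "" ((PySem.List.pyRange 1 (n + 1) 1).map PySem.Int.toStr)

-- cumulative offset: total digit length of str(1)..str(a-1)
def pvS (a : Int) : Int :=
  ((PySem.List.pyRange 1 a 1).map (fun j => PySem.Str.len (PySem.Int.toStr j))).sum

-- the rows B's loop emits, starting from offset o
def pvErows (full : String) : Int → List Int → List String
  | _, [] => []
  | o, i :: t =>
      PySem.Str.slice full none (some (o + PySem.Str.len (PySem.Int.toStr i))) ::
        pvErows full (o + PySem.Str.len (PySem.Int.toStr i)) t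

lemma pvJoin_empty_flatten (parts : List (List Char)) :
    PySem.Chars.join [] parts = parts.flatten := by
  induction parts with
  | nil => simp [PySem.Chars.join_nil]
  | cons a t ih =>
    cases t with
    | nil => simp [PySem.Chars.join_singleton]
    | cons b u => rw [PySem.Chars.join_cons_cons]; simp_all

lemma pvRowA_toList_aux (l : List Int) :
    ∀ (s : String),
      (l.foldl (fun row j => row ++ PySem.Int.toStr j) s).toList
        = s.toList ++ (l.map PySem.Int.toChars).flatten := by
  induction l with
  | nil => intro s; simp
  | cons i t ih =>
    intro s
    simp only [List.foldl_cons, List.map_cons, List.flatten_cons]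
    rw [ih]
    simp [PySem.Int.toList_toStr]

lemma pvRowA_toList (i : Int) :
    (pvRowA i).toList = ((PySem.List.pyRange 1 (i + 1) 1).map PySem.Int.toChars).flatten := by
  simpa using pvRowA_toList_aux (PySem.List.pyRange 1 (i + 1) 1) ""

lemma pvFull_toList (n : Int) :
    (pvFull n).toList = ((PySem.List.pyRange 1 (n + 1) 1).map PySem.Int.toChars).flatten := by
  simp [pvFull, PySem.Str.toList_join, pvJoin_empty_flatten, List.map_map,
    Function.comp_def, PySem.Int.toList_toStr]

lemma pvSum_len_eq (l : List Int) :
    (l.map (fun j => PySem.Str.len (PySem.Int.toStr j))).sum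
      = ((l.map PySem.Int.toChars).flatten.length : Int) := by
  induction l with
  | nil => simp
  | cons i t ih =>
    simp [PySem.Str.len_eq, PySem.Int.toList_toStr, Function.comp_def]

lemma pvS_nonneg (a : Int) : 0 ≤ pvS a := by
  rw [pvS, pvSum_len_eq]; positivity

-- the key pointwise fact: the prefix slice at offset pvS (a+1) is exactly row a
lemma pvSlice_eq_row (n a : Int) (h1 : 1 ≤ a) (h2 : a ≤ n) :
    PySem.Str.slice (pvFull n) none (some (pvS (a + 1))) = pvRowA a := by
  apply String.toList_inj.mp
  have hnn : (0 : Int) ≤ pvS (a + 1) := pvS_nonneg _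
  have hsplit : PySem.List.pyRange 1 (n + 1) 1
      = PySem.List.pyRange 1 (a + 1) 1 ++ PySem.List.pyRange (a + 1) (n + 1) 1 :=
    PySem.List.pyRange_one_append 1 (a + 1) (n + 1) (by omega) (by omega)
  have hlen : (pvS (a + 1)).toNat
      = ((PySem.List.pyRange 1 (a + 1) 1).map PySem.Int.toChars).flatten.length := by
    have := pvSum_len_eq (PySem.List.pyRange 1 (a + 1) 1)
    rw [pvS, this]; omega
  have hts : (PySem.Str.slice (pvFull n) none (some (pvS (a + 1)))).toList
      = PySem.List.slice (pvFull n).toList none (some (pvS (a + 1))) := by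
    simp [PySem.Str.slice]
  rw [hts, PySem.List.slice_to _ hnn, pvFull_toList, hsplit, List.map_append,
    List.flatten_append, hlen, List.take_left, pvRowA_toList]

lemma pvFoldl_step (full : String) (l : List Int) :
    ∀ (o : Int) (acc : List String),
      (l.foldl
        (fun (st : Int × List String) i =>
          let offset := st.1 + PySem.Str.len (PySem.Int.toStr i)
          (offset, st.2 ++ [PySem.Str.slice full none (some offset)]))
        (o, acc))
      = (o + (l.map (fun j => PySem.Str.len (PySem.Int.toStr j))).sum,
         acc ++ pvErows full o l) := by
  induction l with
  | nil => intro o acc; simp [pvErows]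
  | cons i t ih =>
    intro o acc
    simp only [List.foldl_cons, pvErows]
    rw [ih]
    simp
    ring

lemma pvS_succ (a : Int) (h : 1 ≤ a) :
    pvS (a + 1) = pvS a + PySem.Str.len (PySem.Int.toStr a) := by
  rw [pvS, pvS, PySem.List.pyRange_one_succ_right h]
  simp

lemma pvErows_eq_map (n : Int) :
    ∀ (k : Nat) (a : Int), 1 ≤ a → (n + 1 - a).toNat = k →
      pvErows (pvFull n) (pvS a) (PySem.List.pyRange a (n + 1) 1)
        = (PySem.List.pyRange a (n + 1) 1).map pvRowA := by
  intro k
  induction k with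
  | zero =>
    intro a _ hk
    rw [PySem.List.pyRange_one_eq_nil (by omega)]
    simp [pvErows]
  | succ k ih =>
    intro a ha hk
    have hlt : a < n + 1 := by omega
    rw [PySem.List.pyRange_one_cons hlt]
    simp only [pvErows, List.map_cons]
    rw [← pvS_succ a ha, pvSlice_eq_row n a ha (by omega),
      ih (a + 1) (by omega) (by omega)]

-- ===== VERDICT (by name: the statement is the Claim_ definition above) =====
theorem incrementingTriangle_spec : Claim_equal_incrementingTriangle := by
  intro n _
  show incrementingTriangle n = incrementingTriangle_alt n
  rw [incrementingTriangle, incrementingTriangle_alt,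
    PySem.List.foldl_append_singleton_eq_map (fun i =>
      (PySem.List.pyRange 1 (i + 1) 1).foldl (fun row j => row ++ PySem.Int.toStr j) "")]
  show (PySem.List.pyRange 1 (n + 1) 1).map pvRowA = _
  have hf : PySem.Str.join "" ((PySem.List.pyRange 1 (n + 1) 1).map PySem.Int.toStr) = pvFull n := rfl
  rw [hf, pvFoldl_step (pvFull n) (PySem.List.pyRange 1 (n + 1) 1) 0 []]
  have h1 : pvS 1 = 0 := by
    rw [pvS, PySem.List.pyRange_one_eq_nil (by omega)]; simp
  rw [List.nil_append, ← h1,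
    pvErows_eq_map n (n + 1 - 1).toNat 1 (by omega) rfl]
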